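-- pv_equiv track=rewrite | github.com/hurtporterIII/AgenticEconomy | backend/utils/build_building_catalog.py | _build_walkability_grid
-- ===== SOURCE A (Python) =====
-- def _to_idx(x: int, y: int, width: int) -> int:
--     return y * width + x
--
-- def _in_bounds(x: int, y: int, width: int, height: int) -> bool:
--     return 0 <= x < width and 0 <= y < height
--
-- def _door_tile(
--     x: int,
--     y: int,
--     width: int,
--     height: int,
--     wall_data: list[int],
--     interior_data: list[int],
--     exterior_data: list[int],
-- ) -> bool:
--     if wall_data[_to_idx(x, y, width)] <= 0:
--         return False
--     has_interior = False
--     has_exterior = False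
--     for nx, ny in ((x + 1, y), (x - 1, y), (x, y + 1), (x, y - 1)):
--         if not _in_bounds(nx, ny, width, height):
--             continue
--         nidx = _to_idx(nx, ny, width)
--         if interior_data[nidx] > 0:
--             has_interior = True
--         if exterior_data[nidx] > 0:
--             has_exterior = True
--     return has_interior and has_exterior
--
-- def _build_walkability_grid(
--     width: int,
--     height: int,
--     collision_data: list[int],
--     wall_data: list[int],
--     interior_data: list[int],
--     exterior_data: list[int],
-- ) -> list[bool]:
--     walkable = [True] * (width * height)
--     for y in range(height):
--         for x in range(width):
--             idx = _to_idx(x, y, width)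
--             blocked = False
--             if collision_data[idx] > 0:
--                 blocked = True
--             elif wall_data[idx] > 0 and not _door_tile(x, y, width, height, wall_data, interior_data, exterior_data):
--                 blocked = True
--             walkable[idx] = not blocked
--     return walkable
-- ===== SOURCE B (Python) =====
-- def _scatter_neighbors(width, height, data):
--     # mark every in-bounds neighbor of each cell whose data value is > 0
--     marked = [False] * (width * height)
--     for y in range(height):
--         for x in range(width):
--             if data[y * width + x] > 0:
--                 if x + 1 < width:
--                     marked[y * width + x + 1] = True
--                 if x - 1 >= 0:
--                     marked[y * width + x - 1] = True
--                 if y + 1 < height: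
--                     marked[(y + 1) * width + x] = True
--                 if y - 1 >= 0:
--                     marked[(y - 1) * width + x] = True
--     return marked
--
-- def _build_walkability_grid(width, height, collision_data, wall_data, interior_data, exterior_data):
--     has_int = _scatter_neighbors(width, height, interior_data)
--     has_ext = _scatter_neighbors(width, height, exterior_data)
--     walkable = [True] * (width * height)
--     for y in range(height):
--         for x in range(width):
--             idx = y * width + x
--             walkable[idx] = not (collision_data[idx] > 0 or
--                                  (wall_data[idx] > 0 and
--                                   not (has_int[idx] and has_ext[idx])))
--     return walkable
-- ===== Notes on version B (the rewrite author's own statement) =====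
-- stated objective: alternative
-- what changed: Replaces the per-wall-cell inline neighbor gather (_door_tile) by two scatter passes that precompute boolean has_int/has_ext neighbor-presence tables, then a second pass reads the tables instead of re-scanning neighbors.
-- outside the precondition, e.g. on _build_walkability_grid(1, 1, [1], [], [], []): A returns [False], B raises IndexError
import Mathlib
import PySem

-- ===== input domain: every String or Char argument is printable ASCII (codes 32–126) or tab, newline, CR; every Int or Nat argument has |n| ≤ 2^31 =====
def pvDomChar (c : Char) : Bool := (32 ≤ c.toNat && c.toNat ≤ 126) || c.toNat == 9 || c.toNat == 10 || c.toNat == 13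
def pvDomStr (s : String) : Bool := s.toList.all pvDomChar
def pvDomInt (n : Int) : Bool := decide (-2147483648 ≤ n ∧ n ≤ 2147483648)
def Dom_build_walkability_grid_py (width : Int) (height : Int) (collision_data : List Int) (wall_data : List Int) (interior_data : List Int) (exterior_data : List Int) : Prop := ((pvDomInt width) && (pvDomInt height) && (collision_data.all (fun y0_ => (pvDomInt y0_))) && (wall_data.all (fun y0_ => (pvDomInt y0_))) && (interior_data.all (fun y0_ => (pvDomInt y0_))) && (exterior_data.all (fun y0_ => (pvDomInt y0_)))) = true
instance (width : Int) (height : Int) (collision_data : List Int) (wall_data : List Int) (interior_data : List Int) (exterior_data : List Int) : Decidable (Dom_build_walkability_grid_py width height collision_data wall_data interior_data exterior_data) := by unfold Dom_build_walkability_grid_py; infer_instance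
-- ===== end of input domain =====

-- B replaces the per-wall-cell inline neighbor gather by two scatter passes precomputing
-- neighbor-presence tables has_int/has_ext, read by a second pass (objective: alternative).
-- ===== PORT A =====
def pvToIdx (x y width : Int) : Int := y * width + x

def pvInBounds (x y width height : Int) : Bool :=
  decide (0 ≤ x ∧ x < width) && decide (0 ≤ y ∧ y < height)

def pvDoorStep (width height : Int) (interior_data exterior_data : List Int)
    (st : Bool × Bool) (p : Int × Int) : Bool × Bool :=
  if !pvInBounds p.1 p.2 width height then st
  else
    let nidx := pvToIdx p.1 p.2 width
    let st1 := if PySem.List.pyGetD interior_data nidx 0 > 0 then (true, st.2) else st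
    if PySem.List.pyGetD exterior_data nidx 0 > 0 then (st1.1, true) else st1

def pvDoorTile (x y width height : Int) (wall_data interior_data exterior_data : List Int) : Bool :=
  if PySem.List.pyGetD wall_data (pvToIdx x y width) 0 ≤ 0 then false
  else
    let st := [(x+1,y),(x-1,y),(x,y+1),(x,y-1)].foldl
      (pvDoorStep width height interior_data exterior_data) (false, false)
    st.1 && st.2

def build_walkability_grid_py (width : Int) (height : Int) (collision_data : List Int) (wall_data : List Int) (interior_data : List Int) (exterior_data : List Int) : List Bool :=
  (PySem.List.pyRange 0 height 1).foldl (fun wk y =>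
    (PySem.List.pyRange 0 width 1).foldl (fun wk x =>
      let idx := pvToIdx x y width
      let blocked :=
        if PySem.List.pyGetD collision_data idx 0 > 0 then true
        else if PySem.List.pyGetD wall_data idx 0 > 0 &&
                !pvDoorTile x y width height wall_data interior_data exterior_data then true
        else false
      wk.set idx.toNat (!blocked)) wk)
    (List.replicate (width*height).toNat true)

-- ===== PORT B =====
def pvScatterNeighbors (width height : Int) (data : List Int) : List Bool :=
  (PySem.List.pyRange 0 height 1).foldl (fun mk y =>
    (PySem.List.pyRange 0 width 1).foldl (fun mk x =>
      if PySem.List.pyGetD data (y*width+x) 0 > 0 then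
        let mk1 := if x+1 < width then mk.set (y*width+x+1).toNat true else mk
        let mk2 := if x-1 ≥ 0 then mk1.set (y*width+x-1).toNat true else mk1
        let mk3 := if y+1 < height then mk2.set ((y+1)*width+x).toNat true else mk2
        if y-1 ≥ 0 then mk3.set ((y-1)*width+x).toNat true else mk3
      else mk) mk)
    (List.replicate (width*height).toNat false)

def build_walkability_grid_py_alt (width : Int) (height : Int) (collision_data : List Int) (wall_data : List Int) (interior_data : List Int) (exterior_data : List Int) : List Bool :=
  let hasInt := pvScatterNeighbors width height interior_data
  let hasExt := pvScatterNeighbors width height exterior_data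
  (PySem.List.pyRange 0 height 1).foldl (fun wk y =>
    (PySem.List.pyRange 0 width 1).foldl (fun wk x =>
      let idx := y*width+x
      wk.set idx.toNat (!(PySem.List.pyGetD collision_data idx 0 > 0 ||
        (PySem.List.pyGetD wall_data idx 0 > 0 &&
         !(hasInt.getD idx.toNat false && hasExt.getD idx.toNat false))))) wk)
    (List.replicate (width*height).toNat true)

-- ===== PRECONDITION & SPEC =====
-- Pre_ excludes inputs where some data list is shorter than width*height: there the Python
-- programs can raise IndexError (B always does; A can still return when e.g. every collision
-- cell is positive, so the wall/interior lists are never read).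
def Pre_build_walkability_grid_py (width : Int) (height : Int) (collision_data : List Int) (wall_data : List Int) (interior_data : List Int) (exterior_data : List Int) : Prop :=
  width * height ≤ (collision_data.length : Int) ∧
  width * height ≤ (wall_data.length : Int) ∧
  width * height ≤ (interior_data.length : Int) ∧
  width * height ≤ (exterior_data.length : Int)
instance (width : Int) (height : Int) (collision_data : List Int) (wall_data : List Int) (interior_data : List Int) (exterior_data : List Int) : Decidable (Pre_build_walkability_grid_py width height collision_data wall_data interior_data exterior_data) := by unfold Pre_build_walkability_grid_py; infer_instance

def pvWitness_build_walkability_grid_py : Int × Int × List Int × List Int × List Int × List Int :=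
  (2, 2, [0,0,0,0], [0,1,0,0], [1,0,0,0], [0,0,0,1])

def Spec_build_walkability_grid_py (width : Int) (height : Int) (collision_data : List Int) (wall_data : List Int) (interior_data : List Int) (exterior_data : List Int) (out : List Bool) : Prop := out = build_walkability_grid_py_alt width height collision_data wall_data interior_data exterior_data
instance (width : Int) (height : Int) (collision_data : List Int) (wall_data : List Int) (interior_data : List Int) (exterior_data : List Int) (out : List Bool) : Decidable (Spec_build_walkability_grid_py width height collision_data wall_data interior_data exterior_data out) := by unfold Spec_build_walkability_grid_py; infer_instance

-- ===== CLAIM (what is proved, stated in full; the proofs are below) =====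
def Claim_equal_build_walkability_grid_py : Prop := ∀ (width : Int) (height : Int) (collision_data : List Int) (wall_data : List Int) (interior_data : List Int) (exterior_data : List Int), Dom_build_walkability_grid_py width height collision_data wall_data interior_data exterior_data → Pre_build_walkability_grid_py width height collision_data wall_data interior_data exterior_data → Spec_build_walkability_grid_py width height collision_data wall_data interior_data exterior_data (build_walkability_grid_py width height collision_data wall_data interior_data exterior_data)

-- ===== LEMMAS AND PROOFS =====

-- the grid cells in the iteration order of both programs, as Nat coordinates (x, y)
def pvCells (W H : Nat) : List (Nat × Nat) :=
  (List.range H).flatMap (fun y => (List.range W).map (fun x => (x, y)))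

-- the indices marked by B's scatter pass for one cell (that cell's write events)
def pvEventsI (width height : Int) (data : List Int) (x y : Int) : List Nat :=
  if PySem.List.pyGetD data (y*width+x) 0 > 0 then
    (if x+1 < width then [(y*width+x+1).toNat] else []) ++
    (if x-1 ≥ 0 then [(y*width+x-1).toNat] else []) ++
    (if y+1 < height then [((y+1)*width+x).toNat] else []) ++
    (if y-1 ≥ 0 then [((y-1)*width+x).toNat] else [])
  else []

-- A's gather condition at cell (x, y): some in-bounds 4-neighbor has data > 0
abbrev pvGatherP (W H : Nat) (data : List Int) (x y : Nat) : Prop :=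
  ∃ p ∈ [((x:Int)+1,(y:Int)), ((x:Int)-1,(y:Int)), ((x:Int),(y:Int)+1), ((x:Int),(y:Int)-1)],
    pvInBounds p.1 p.2 (W:Int) (H:Int) = true ∧ PySem.List.pyGetD data (pvToIdx p.1 p.2 (W:Int)) 0 > 0


lemma pv_flatten_foldl {α β γ : Type} (ys : List β) (xs : List γ) (g : β → α → γ → α) (init : α) :
    ys.foldl (fun a y => xs.foldl (g y) a) init
      = (ys.flatMap (fun y => xs.map (fun x => (x, y)))).foldl (fun a c => g c.2 a c.1) init := by
  induction ys generalizing init with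
  | nil => simp
  | cons y ys ih => simp [List.foldl_append, List.foldl_map, ih]

lemma pv_foldl_flatMap {α β γ : Type} (cs : List β) (m : β → List γ) (g : α → γ → α) (init : α) :
    cs.foldl (fun a c => (m c).foldl g a) init = (cs.flatMap m).foldl g init := by
  induction cs generalizing init with
  | nil => simp
  | cons c cs ih => simp [List.foldl_append, ih]

lemma pv_foldl_set_getElem? {σ : Type} (cs : List σ) (ix : σ → Nat) (v : σ → Bool) (L : List Bool) (j : Nat) :
    (cs.foldl (fun acc c => acc.set (ix c) (v c)) L)[j]? =
      match cs.reverse.find? (fun c => ix c == j) with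
      | some c => if j < L.length then some (v c) else none
      | none => L[j]? := by
  induction cs generalizing L with
  | nil => simp
  | cons c cs ih =>
    rw [List.foldl_cons, ih, List.reverse_cons, List.find?_append]
    cases hf : cs.reverse.find? (fun c => ix c == j) with
    | some c' => simp [List.length_set]
    | none =>
      simp only [Option.none_or]
      by_cases hx : ix c = j
      · subst hx; simp only [List.find?, beq_self_eq_true]
        by_cases hl : ix c < L.length
        · rw [if_pos hl]
          exact List.getElem?_set_self hl
        · simp only [hl, if_false]
          rw [List.getElem?_set_self' , List.getElem?_eq_none (l := L) (by omega)]
          simp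
      · have : (ix c == j) = false := by simp [hx]
        simp [List.find?, this, List.getElem?_set_ne hx]

lemma pv_foldl_set_value {σ : Type} (cs : List σ) (ix : σ → Nat) (v : σ → Bool) (L : List Bool)
    (c : σ) (hc : c ∈ cs) (huniq : ∀ c' ∈ cs, ix c' = ix c → c' = c) (hj : ix c < L.length) :
    (cs.foldl (fun acc c => acc.set (ix c) (v c)) L)[ix c]? = some (v c) := by
  rw [pv_foldl_set_getElem?]
  cases hf : cs.reverse.find? (fun c' => ix c' == ix c) with
  | none =>
    rw [List.find?_eq_none] at hf
    exact absurd (by simp : (ix c == ix c) = true) (hf c (List.mem_reverse.2 hc))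
  | some c' =>
    have h1 := List.find?_some hf
    have h2 := List.mem_of_find?_eq_some hf
    have : c' = c := huniq c' (List.mem_reverse.1 h2) (by simpa using h1)
    subst this
    simp [hj]

lemma pv_foldl_set_true (es : List Nat) (n j : Nat) (hj : j < n) :
    (es.foldl (fun acc i => acc.set i true) (List.replicate n false))[j]? = some (decide (j ∈ es)) := by
  have := pv_foldl_set_getElem? es (fun i => i) (fun _ => true) (List.replicate n false) j
  simp only [this]
  cases hf : es.reverse.find? (fun i => i == j) with
  | none =>
    rw [List.find?_eq_none] at hf
    have hnm : j ∉ es := fun hm => by simpa using hf j (List.mem_reverse.2 hm)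
    simp [hnm, hj]
  | some i =>
    have h1 := List.find?_some hf
    have h2 := List.mem_of_find?_eq_some hf
    have : i = j := by simpa using h1
    subst this
    have : i ∈ es := List.mem_reverse.1 h2
    simp [this, hj]

lemma pv_mem_cells (W H x y : Nat) : (x, y) ∈ pvCells W H ↔ x < W ∧ y < H := by
  simp [pvCells, List.mem_flatMap, List.mem_map, List.mem_range]
  aesop

lemma pv_idx_unique {W x x' y y' : Nat} (hx : x < W) (hx' : x' < W)
    (h : y*W+x = y'*W+x') : x = x' ∧ y = y' := by
  have h1 : (y*W+x) % W = x := by rw [Nat.mul_comm, Nat.mul_add_mod]; exact Nat.mod_eq_of_lt hx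
  have h2 : (y'*W+x') % W = x' := by rw [Nat.mul_comm, Nat.mul_add_mod]; exact Nat.mod_eq_of_lt hx'
  have hxx : x = x' := by rw [← h1, ← h2, h]
  constructor
  · exact hxx
  · subst hxx
    have hW : 0 < W := by omega
    have := Nat.eq_of_mul_eq_mul_right hW (by omega : y*W = y'*W)
    omega

lemma pv_pyRange_eq (k : Int) :
    PySem.List.pyRange 0 k 1 = (List.range k.toNat).map (fun (i : Nat) => (i : Int)) := by
  rcases (by omega : 0 ≤ k ∨ k < 0) with h | h
  · have : k = (k.toNat : Int) := (Int.toNat_of_nonneg h).symm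
    rw [this]
    exact PySem.List.pyRange_zero_natCast k.toNat
  · have h1 : PySem.List.pyRange 0 k 1 = [] := by
      rw [List.eq_nil_iff_forall_not_mem]
      intro a ha
      rw [PySem.List.mem_pyRange_one] at ha
      omega
    have h2 : k.toNat = 0 := by omega
    rw [h1, h2]
    rfl

lemma pv_nest_eq {α : Type} (w h : Int) (b : α → Int → Int → α) (init : α) :
    (PySem.List.pyRange 0 h 1).foldl
        (fun a y => (PySem.List.pyRange 0 w 1).foldl (fun a x => b a x y) a) init
      = (pvCells w.toNat h.toNat).foldl (fun a p => b a (p.1 : Int) (p.2 : Int)) init := by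
  rw [pv_pyRange_eq, pv_pyRange_eq]
  simp only [List.foldl_map]
  rw [pv_flatten_foldl (g := fun (y : Nat) a (x : Nat) => b a (x : Int) (y : Int))]
  rfl


lemma pv_bool_eq_decide (b : Bool) (P : Prop) [Decidable P] (h : b = true ↔ P) : b = decide P := by
  cases b <;> simp_all

lemma pv_door_fold_fst (w h : Int) (idata edata : List Int) (ps : List (Int × Int)) (st : Bool × Bool) :
    (ps.foldl (pvDoorStep w h idata edata) st).1
      = (st.1 || ps.any (fun p => pvInBounds p.1 p.2 w h &&
          decide (PySem.List.pyGetD idata (pvToIdx p.1 p.2 w) 0 > 0))) := by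
  induction ps generalizing st with
  | nil => simp
  | cons p ps ih =>
    rw [List.foldl_cons, ih, List.any_cons]
    unfold pvDoorStep
    by_cases h1 : pvInBounds p.1 p.2 w h <;>
    by_cases h2 : PySem.List.pyGetD idata (pvToIdx p.1 p.2 w) 0 > 0 <;>
    by_cases h3 : PySem.List.pyGetD edata (pvToIdx p.1 p.2 w) 0 > 0 <;>
    simp [h1, h2, h3]

lemma pv_door_fold_snd (w h : Int) (idata edata : List Int) (ps : List (Int × Int)) (st : Bool × Bool) :
    (ps.foldl (pvDoorStep w h idata edata) st).2
      = (st.2 || ps.any (fun p => pvInBounds p.1 p.2 w h &&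
          decide (PySem.List.pyGetD edata (pvToIdx p.1 p.2 w) 0 > 0))) := by
  induction ps generalizing st with
  | nil => simp
  | cons p ps ih =>
    rw [List.foldl_cons, ih, List.any_cons]
    unfold pvDoorStep
    by_cases h1 : pvInBounds p.1 p.2 w h <;>
    by_cases h2 : PySem.List.pyGetD idata (pvToIdx p.1 p.2 w) 0 > 0 <;>
    by_cases h3 : PySem.List.pyGetD edata (pvToIdx p.1 p.2 w) 0 > 0 <;>
    simp [h1, h2, h3]

lemma pv_door_eq (W H : Nat) (x y : Nat) (wd idata edata : List Int) :
    pvDoorTile (x:Int) (y:Int) (W:Int) (H:Int) wd idata edata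
      = (decide (PySem.List.pyGetD wd (pvToIdx (x:Int) (y:Int) (W:Int)) 0 > 0) &&
         (decide (pvGatherP W H idata x y) && decide (pvGatherP W H edata x y))) := by
  unfold pvDoorTile
  split_ifs with hw
  · have : ¬ PySem.List.pyGetD wd (pvToIdx (x:Int) (y:Int) (W:Int)) 0 > 0 := by omega
    simp [this]
  · dsimp only
    rw [pv_door_fold_fst, pv_door_fold_snd]
    have hw' : PySem.List.pyGetD wd (pvToIdx (x:Int) (y:Int) (W:Int)) 0 > 0 := by omega
    simp only [hw', decide_true, Bool.true_and, Bool.false_or]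
    congr 1
    · exact pv_bool_eq_decide _ _ (by simp [pvGatherP])
    · exact pv_bool_eq_decide _ _ (by simp [pvGatherP])

lemma pv_cellwrites (w h : Int) (data : List Int) (mk : List Bool) (x y : Int) :
    (if PySem.List.pyGetD data (y*w+x) 0 > 0 then
        let mk1 := if x+1 < w then mk.set (y*w+x+1).toNat true else mk
        let mk2 := if x-1 ≥ 0 then mk1.set (y*w+x-1).toNat true else mk1
        let mk3 := if y+1 < h then mk2.set ((y+1)*w+x).toNat true else mk2
        if y-1 ≥ 0 then mk3.set ((y-1)*w+x).toNat true else mk3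
      else mk)
    = (pvEventsI w h data x y).foldl (fun acc i => acc.set i true) mk := by
  unfold pvEventsI
  split_ifs <;> simp


lemma pv_foldl_set_none {σ : Type} (cs : List σ) (ix : σ → Nat) (v : σ → Bool) (L : List Bool)
    (j : Nat) (hj : L.length ≤ j) :
    (cs.foldl (fun acc c => acc.set (ix c) (v c)) L)[j]? = none := by
  rw [pv_foldl_set_getElem?]
  cases cs.reverse.find? (fun c => ix c == j) with
  | some c => simp; omega
  | none => exact List.getElem?_eq_none hj

lemma pv_mem_ite_singleton (c : Prop) [Decidable c] (a j : Nat) :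
    (j ∈ if c then [a] else []) ↔ c ∧ j = a := by
  split_ifs <;> simp_all

lemma pv_mem_eventsI (W H : Nat) (data : List Int) (x' y' j : Nat) :
    j ∈ pvEventsI (W:Int) (H:Int) data (x':Int) (y':Int) ↔
      (PySem.List.pyGetD data ((y':Int)*(W:Int)+(x':Int)) 0 > 0 ∧
       ((x'+1 < W ∧ j = y'*W+(x'+1)) ∨ (1 ≤ x' ∧ j = y'*W+(x'-1)) ∨
        (y'+1 < H ∧ j = (y'+1)*W+x') ∨ (1 ≤ y' ∧ j = (y'-1)*W+x'))) := by
  have e1 : ((y':Int)*(W:Int)+(x':Int)+1).toNat = y'*W+(x'+1) := by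
    have h : ((y':Int)*(W:Int)+(x':Int)+1) = ((y'*W+(x'+1) : Nat) : Int) := by push_cast; ring
    rw [h, Int.toNat_natCast]
  have e2 : 1 ≤ x' → ((y':Int)*(W:Int)+(x':Int)-1).toNat = y'*W+(x'-1) := by
    intro hx1
    have hc : ((x'-1 : Nat) : Int) = (x':Int)-1 := by omega
    have h : ((y':Int)*(W:Int)+(x':Int)-1) = ((y'*W+(x'-1) : Nat) : Int) := by
      push_cast [hc]; ring
    rw [h, Int.toNat_natCast]
  have e3 : (((y':Int)+1)*(W:Int)+(x':Int)).toNat = (y'+1)*W+x' := by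
    have h : (((y':Int)+1)*(W:Int)+(x':Int)) = (((y'+1)*W+x' : Nat) : Int) := by push_cast; ring
    rw [h, Int.toNat_natCast]
  have e4 : 1 ≤ y' → (((y':Int)-1)*(W:Int)+(x':Int)).toNat = (y'-1)*W+x' := by
    intro hy1
    have hc : ((y'-1 : Nat) : Int) = (y':Int)-1 := by omega
    have h : (((y':Int)-1)*(W:Int)+(x':Int)) = (((y'-1)*W+x' : Nat) : Int) := by
      push_cast [hc]; ring
    rw [h, Int.toNat_natCast]
  by_cases hd : PySem.List.pyGetD data ((y':Int)*(W:Int)+(x':Int)) 0 > 0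
  · rw [pvEventsI, if_pos hd]
    simp only [List.mem_append, pv_mem_ite_singleton]
    constructor
    · rintro (((⟨hg, hj⟩ | ⟨hg, hj⟩) | ⟨hg, hj⟩) | ⟨hg, hj⟩)
      · exact ⟨hd, Or.inl ⟨by omega, by rw [hj, e1]⟩⟩
      · have hx1 : 1 ≤ x' := by omega
        exact ⟨hd, Or.inr (Or.inl ⟨hx1, by rw [hj, e2 hx1]⟩)⟩
      · exact ⟨hd, Or.inr (Or.inr (Or.inl ⟨by omega, by rw [hj, e3]⟩))⟩
      · have hy1 : 1 ≤ y' := by omega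
        exact ⟨hd, Or.inr (Or.inr (Or.inr ⟨hy1, by rw [hj, e4 hy1]⟩))⟩
    · rintro ⟨-, (⟨hg, hj⟩ | ⟨hg, hj⟩ | ⟨hg, hj⟩ | ⟨hg, hj⟩)⟩
      · exact Or.inl (Or.inl (Or.inl ⟨by omega, by rw [hj, e1]⟩))
      · exact Or.inl (Or.inl (Or.inr ⟨by omega, by rw [hj, e2 hg]⟩))
      · exact Or.inl (Or.inr ⟨by omega, by rw [hj, e3]⟩)
      · exact Or.inr ⟨by omega, by rw [hj, e4 hg]⟩
  · rw [pvEventsI, if_neg hd]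
    simp [hd]

lemma pv_scatter_getElem? (w h : Int) (data : List Int) (j : Nat) (hj : j < (w*h).toNat) :
    (pvScatterNeighbors w h data)[j]? =
      some (decide (j ∈ (pvCells w.toNat h.toNat).flatMap
        (fun p => pvEventsI w h data (p.1:Int) (p.2:Int)))) := by
  unfold pvScatterNeighbors
  rw [pv_nest_eq]
  simp only [pv_cellwrites]
  rw [pv_foldl_flatMap]
  exact pv_foldl_set_true _ _ _ hj

lemma pv_gather_iff (W H : Nat) (data : List Int) (x y : Nat) (hx : x < W) (hy : y < H) :
    (y*W+x) ∈ (pvCells W H).flatMap (fun p => pvEventsI (W:Int) (H:Int) data (p.1:Int) (p.2:Int)) ↔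
      pvGatherP W H data x y := by
  rw [List.mem_flatMap]
  constructor
  · rintro ⟨⟨x', y'⟩, hc, hev⟩
    rw [pv_mem_cells] at hc
    rw [pv_mem_eventsI] at hev
    obtain ⟨hd, hcase⟩ := hev
    rcases hcase with ⟨hg, hj⟩ | ⟨hg, hj⟩ | ⟨hg, hj⟩ | ⟨hg, hj⟩
    · obtain ⟨hx1, hy1⟩ := pv_idx_unique hx hg hj
      rw [hx1, hy1]
      refine ⟨(((x'+1:Nat):Int)-1, ((y':Nat):Int)), by simp, ?_, ?_⟩
      · simp only [pvInBounds, Bool.and_eq_true, decide_eq_true_eq]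
        refine ⟨⟨by omega, by omega⟩, ⟨by omega, by omega⟩⟩
      · have h : pvToIdx (((x'+1:Nat):Int)-1) ((y':Nat):Int) (W:Int) = (y':Int)*(W:Int)+(x':Int) := by
          simp only [pvToIdx]; push_cast; ring
        rw [h]; exact hd
    · obtain ⟨hx1, hy1⟩ := pv_idx_unique hx (by omega : x'-1 < W) hj
      rw [hx1, hy1]
      refine ⟨(((x'-1:Nat):Int)+1, ((y':Nat):Int)), by simp, ?_, ?_⟩
      · simp only [pvInBounds, Bool.and_eq_true, decide_eq_true_eq]
        refine ⟨⟨by omega, by omega⟩, ⟨by omega, by omega⟩⟩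
      · have h : pvToIdx (((x'-1:Nat):Int)+1) ((y':Nat):Int) (W:Int) = (y':Int)*(W:Int)+(x':Int) := by
          have hc2 : ((x'-1 : Nat) : Int) = (x':Int)-1 := by omega
          simp only [pvToIdx, hc2]; ring
        rw [h]; exact hd
    · obtain ⟨hx1, hy1⟩ := pv_idx_unique hx hc.1 hj
      rw [hx1, hy1]
      refine ⟨(((x':Nat):Int), ((y'+1:Nat):Int)-1), by simp, ?_, ?_⟩
      · simp only [pvInBounds, Bool.and_eq_true, decide_eq_true_eq]
        refine ⟨⟨by omega, by omega⟩, ⟨by omega, by omega⟩⟩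
      · have h : pvToIdx ((x':Nat):Int) (((y'+1:Nat):Int)-1) (W:Int) = (y':Int)*(W:Int)+(x':Int) := by
          simp only [pvToIdx]; push_cast; ring
        rw [h]; exact hd
    · obtain ⟨hx1, hy1⟩ := pv_idx_unique hx hc.1 hj
      rw [hx1, hy1]
      refine ⟨(((x':Nat):Int), ((y'-1:Nat):Int)+1), by simp, ?_, ?_⟩
      · simp only [pvInBounds, Bool.and_eq_true, decide_eq_true_eq]
        refine ⟨⟨by omega, by omega⟩, ⟨by omega, by omega⟩⟩
      · have h : pvToIdx ((x':Nat):Int) (((y'-1:Nat):Int)+1) (W:Int) = (y':Int)*(W:Int)+(x':Int) := by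
          have hc2 : ((y'-1 : Nat) : Int) = (y':Int)-1 := by omega
          simp only [pvToIdx, hc2]; ring
        rw [h]; exact hd
  · rintro ⟨p, hp, hb, hd⟩
    simp only [pvInBounds, Bool.and_eq_true, decide_eq_true_eq] at hb
    simp only [List.mem_cons] at hp
    rcases hp with hp | hp | hp | hp | hp
    · subst hp
      simp only [pvToIdx] at hd hb
      refine ⟨(x+1, y), (pv_mem_cells _ _ _ _).2 ⟨by omega, hy⟩, ?_⟩
      rw [pv_mem_eventsI]
      refine ⟨?_, Or.inr (Or.inl ⟨by omega, by rfl⟩)⟩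
      have h : ((y:Nat):Int)*(W:Int)+((x+1:Nat):Int) = (y:Int)*(W:Int)+((x:Int)+1) := by
        push_cast; ring
      rw [h]; exact hd
    · subst hp
      simp only [pvToIdx] at hd hb
      have hx1 : 1 ≤ x := by omega
      refine ⟨(x-1, y), (pv_mem_cells _ _ _ _).2 ⟨by omega, hy⟩, ?_⟩
      rw [pv_mem_eventsI]
      refine ⟨?_, Or.inl ⟨by omega, by congr 1; omega⟩⟩
      have h : ((y:Nat):Int)*(W:Int)+((x-1:Nat):Int) = (y:Int)*(W:Int)+((x:Int)-1) := by
        have hc2 : ((x-1 : Nat) : Int) = (x:Int)-1 := by omega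
        rw [hc2]
      rw [h]; exact hd
    · subst hp
      simp only [pvToIdx] at hd hb
      refine ⟨(x, y+1), (pv_mem_cells _ _ _ _).2 ⟨hx, by omega⟩, ?_⟩
      rw [pv_mem_eventsI]
      refine ⟨?_, Or.inr (Or.inr (Or.inr ⟨by omega, by rfl⟩))⟩
      have h : ((y+1:Nat):Int)*(W:Int)+((x:Nat):Int) = ((y:Int)+1)*(W:Int)+(x:Int) := by
        push_cast; ring
      rw [h]; exact hd
    · subst hp
      simp only [pvToIdx] at hd hb
      have hy1 : 1 ≤ y := by omega
      refine ⟨(x, y-1), (pv_mem_cells _ _ _ _).2 ⟨hx, by omega⟩, ?_⟩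
      rw [pv_mem_eventsI]
      refine ⟨?_, Or.inr (Or.inr (Or.inl ⟨by omega, by congr 1; congr 1; omega⟩))⟩
      have h : ((y-1:Nat):Int)*(W:Int)+((x:Nat):Int) = ((y:Int)-1)*(W:Int)+(x:Int) := by
        have hc2 : ((y-1 : Nat) : Int) = (y:Int)-1 := by omega
        rw [hc2]
      rw [h]; exact hd
    · exact absurd hp (by simp)


-- the per-cell value A writes (port A's loop body), as a function of the cell
def pvVA (W H : Nat) (cd wd idata edata : List Int) (p : Nat × Nat) : Bool :=
  !(if PySem.List.pyGetD cd (pvToIdx (p.1:Int) (p.2:Int) (W:Int)) 0 > 0 then true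
    else if PySem.List.pyGetD wd (pvToIdx (p.1:Int) (p.2:Int) (W:Int)) 0 > 0 &&
            !pvDoorTile (p.1:Int) (p.2:Int) (W:Int) (H:Int) wd idata edata then true
    else false)

-- the per-cell value B writes (port B's second pass body), as a function of the cell
def pvVB (W H : Nat) (cd wd idata edata : List Int) (p : Nat × Nat) : Bool :=
  !(PySem.List.pyGetD cd ((p.2:Int)*(W:Int)+(p.1:Int)) 0 > 0 ||
    (PySem.List.pyGetD wd ((p.2:Int)*(W:Int)+(p.1:Int)) 0 > 0 &&
     !((pvScatterNeighbors (W:Int) (H:Int) idata).getD ((p.2:Int)*(W:Int)+(p.1:Int)).toNat false &&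
       (pvScatterNeighbors (W:Int) (H:Int) edata).getD ((p.2:Int)*(W:Int)+(p.1:Int)).toNat false)))

lemma pv_hIx (W : Nat) (a b : Nat) : (((b:Int))*(W:Int)+(a:Int)).toNat = b*W+a := by
  have h : ((b:Int))*(W:Int)+(a:Int) = ((b*W+a : Nat):Int) := by push_cast; ring
  rw [h, Int.toNat_natCast]

lemma pv_value_eq (W H : Nat) (cd wd idata edata : List Int) (x y : Nat)
    (hx : x < W) (hy : y < H) :
    pvVA W H cd wd idata edata (x,y) = pvVB W H cd wd idata edata (x,y) := by
  have hn : (((W:Int))*(H:Int)).toNat = W*H := by rw [← Nat.cast_mul, Int.toNat_natCast]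
  have hjlt : y*W+x < W*H := by
    calc y*W+x < y*W+W := by omega
    _ = (y+1)*W := by ring
    _ ≤ H*W := Nat.mul_le_mul_right _ (by omega)
    _ = W*H := Nat.mul_comm _ _
  have hsc1 := pv_scatter_getElem? (W:Int) (H:Int) idata (y*W+x) (by rw [hn]; exact hjlt)
  have hsc2 := pv_scatter_getElem? (W:Int) (H:Int) edata (y*W+x) (by rw [hn]; exact hjlt)
  simp only [Int.toNat_natCast] at hsc1 hsc2
  simp only [pv_gather_iff W H idata x y hx hy] at hsc1
  simp only [pv_gather_iff W H edata x y hx hy] at hsc2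
  unfold pvVA pvVB
  dsimp only
  rw [List.getD_eq_getElem?_getD, List.getD_eq_getElem?_getD, pv_hIx W x y, hsc1, hsc2]
  simp only [Option.getD_some]
  rw [pv_door_eq W H x y wd idata edata]
  simp only [pvToIdx]
  by_cases hc : PySem.List.pyGetD cd ((y:Int)*(W:Int)+(x:Int)) 0 > 0 <;>
  by_cases hw2 : PySem.List.pyGetD wd ((y:Int)*(W:Int)+(x:Int)) 0 > 0 <;>
  simp [hc, hw2]

lemma pv_main (W H : Nat) (cd wd idata edata : List Int) :
    build_walkability_grid_py (W:Int) (H:Int) cd wd idata edata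
      = build_walkability_grid_py_alt (W:Int) (H:Int) cd wd idata edata := by
  have hn : (((W:Int))*(H:Int)).toNat = W*H := by rw [← Nat.cast_mul, Int.toNat_natCast]
  unfold build_walkability_grid_py build_walkability_grid_py_alt
  simp only [pv_nest_eq, Int.toNat_natCast, hn]
  apply List.ext_getElem?
  intro j
  by_cases hj : j < W*H
  · have hW : 0 < W := by
      rcases Nat.eq_zero_or_pos W with h | h
      · rw [h] at hj; simp at hj
      · exact h
    have hx : j % W < W := Nat.mod_lt _ hW
    have hy : j / W < H := by
      rw [Nat.div_lt_iff_lt_mul hW, Nat.mul_comm]; exact hj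
    have hdm : (j/W)*W + j%W = j := by
      conv_lhs => rw [Nat.mul_comm]
      exact Nat.div_add_mod j W
    have hixA : (pvToIdx ((j%W:Nat):Int) ((j/W:Nat):Int) (W:Int)).toNat = j := by
      simp only [pvToIdx]; rw [pv_hIx]; exact hdm
    have hc : ((j%W, j/W) : Nat × Nat) ∈ pvCells W H := (pv_mem_cells _ _ _ _).2 ⟨hx, hy⟩
    have huniqA : ∀ c' ∈ pvCells W H,
        (pvToIdx ((c'.1:Nat):Int) ((c'.2:Nat):Int) (W:Int)).toNat
          = (pvToIdx (((j%W:Nat)):Int) (((j/W:Nat)):Int) (W:Int)).toNat → c' = (j%W, j/W) := by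
      rintro ⟨x', y'⟩ hc' he
      rw [pv_mem_cells] at hc'
      simp only [pvToIdx] at he
      rw [pv_hIx, pv_hIx] at he
      obtain ⟨e1, e2⟩ := pv_idx_unique hc'.1 hx he
      rw [e1, e2]
    have hlenA : (pvToIdx (((j%W:Nat)):Int) (((j/W:Nat)):Int) (W:Int)).toNat
        < (List.replicate (W*H) true).length := by
      rw [hixA]; simp [hj]
    have hA := pv_foldl_set_value (pvCells W H)
      (fun p => (pvToIdx ((p.1:Nat):Int) ((p.2:Nat):Int) (W:Int)).toNat)
      (pvVA W H cd wd idata edata) (List.replicate (W*H) true)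
      (j%W, j/W) hc huniqA hlenA
    have hB := pv_foldl_set_value (pvCells W H)
      (fun p => (pvToIdx ((p.1:Nat):Int) ((p.2:Nat):Int) (W:Int)).toNat)
      (pvVB W H cd wd idata edata) (List.replicate (W*H) true)
      (j%W, j/W) hc huniqA hlenA
    dsimp only at hA hB
    rw [hixA] at hA hB
    exact hA.trans ((congrArg some
      (pv_value_eq W H cd wd idata edata (j%W) (j/W) hx hy)).trans hB.symm)
  · have h1 : (List.replicate (W*H) true).length ≤ j := by simp; omega
    exact (pv_foldl_set_none _ _ _ _ _ h1).trans (pv_foldl_set_none _ _ _ _ _ h1).symm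

-- ===== VERDICT (by name: the statement is the Claim_ definition above) =====
theorem build_walkability_grid_py_spec : Claim_equal_build_walkability_grid_py := by
  intro width height collision_data wall_data interior_data exterior_data hDom hPre
  unfold Spec_build_walkability_grid_py
  by_cases hsgn : 0 ≤ width ∧ 0 ≤ height
  · obtain ⟨h1, h2⟩ := hsgn
    rw [← Int.toNat_of_nonneg h1, ← Int.toNat_of_nonneg h2]
    exact pv_main _ _ _ _ _ _
  · unfold build_walkability_grid_py build_walkability_grid_py_alt
    simp only [pv_nest_eq]
    have hcells : pvCells width.toNat height.toNat = [] := by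
      have h0 : width.toNat = 0 ∨ height.toNat = 0 := by omega
      rcases h0 with h | h <;> simp [pvCells, h]
    rw [hcells]
    rfl
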